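-- pv_equiv track=rewrite | github.com/rameshrvr/HackerEarth | Practice/Input_Output/cost_of_balloons.py | calc_minimum_cost_of_balloons
-- ===== SOURCE A (Python) =====
-- def calc_minimum_cost_of_balloons(ballon_cost, participants_data):
--     cost_of_using_green_ballon = 0
--     cost_of_using_purple_ballon = 0
--     for data in participants_data:
--         if data[0] == '1':
--             cost_of_using_green_ballon += ballon_cost[0]
--             cost_of_using_purple_ballon += ballon_cost[1]
--         if data[1] == '1':
--             cost_of_using_green_ballon += ballon_cost[1]
--             cost_of_using_purple_ballon += ballon_cost[0]
--
--     return min(cost_of_using_green_ballon, cost_of_using_purple_ballon)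
-- ===== SOURCE B (Python) =====
-- def calc_minimum_cost_of_balloons(ballon_cost, participants_data):
--     # identity: min(g, p) = ((g + p) - |g - p|) // 2, with
--     # g + p = (b0 + b1) * total_solves and g - p = (b0 - b1) * column_imbalance.
--     solves = 0
--     imbalance = 0
--     for data in participants_data:
--         first = data[0] == '1'
--         second = data[1] == '1'
--         solves += first + second
--         imbalance += first - second
--     b0, b1 = ballon_cost[0], ballon_cost[1]
--     return ((b0 + b1) * solves - abs((b0 - b1) * imbalance)) // 2
-- ===== Notes on version B (the rewrite author's own statement) =====
-- stated objective: alternative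
-- what changed: Replaces A's two running cost accumulators and final min by a loop over different state (total solves and column imbalance) and the closed-form identity min(g,p) = ((g+p) - |g-p|)//2, so no per-assignment cost is ever accumulated and no min is taken.
-- outside the precondition, e.g. on calc_minimum_cost_of_balloons([], []): A returns 0, B raises IndexError; on calc_minimum_cost_of_balloons([5], ['00']): A returns 0, B raises IndexError
import Mathlib
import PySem

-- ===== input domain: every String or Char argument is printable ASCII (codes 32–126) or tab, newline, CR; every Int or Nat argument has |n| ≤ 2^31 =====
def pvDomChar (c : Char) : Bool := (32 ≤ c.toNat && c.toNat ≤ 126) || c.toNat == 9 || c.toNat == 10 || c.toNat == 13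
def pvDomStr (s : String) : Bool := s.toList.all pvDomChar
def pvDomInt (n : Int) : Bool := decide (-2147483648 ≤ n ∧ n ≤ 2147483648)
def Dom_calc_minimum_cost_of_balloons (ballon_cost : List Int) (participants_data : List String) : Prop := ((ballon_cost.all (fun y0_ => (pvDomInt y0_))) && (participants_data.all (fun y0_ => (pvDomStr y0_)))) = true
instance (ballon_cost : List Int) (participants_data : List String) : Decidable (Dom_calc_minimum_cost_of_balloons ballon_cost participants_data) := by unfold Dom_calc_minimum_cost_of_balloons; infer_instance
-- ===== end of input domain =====

-- B replaces A's two running cost accumulators plus min by a solves/imbalance tally and the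
-- identity min(g,p) = ((g+p) - |g-p|) // 2; objective: alternative.
-- ===== PORT A =====
def pvAStep (ballon_cost : List Int) (st : Int × Int) (data : String) : Int × Int :=
  let st1 := if PySem.Str.pyGet? data 0 = some '1' then
      (st.1 + (PySem.List.pyGet? ballon_cost 0).getD 0, st.2 + (PySem.List.pyGet? ballon_cost 1).getD 0)
    else st
  if PySem.Str.pyGet? data 1 = some '1' then
      (st1.1 + (PySem.List.pyGet? ballon_cost 1).getD 0, st1.2 + (PySem.List.pyGet? ballon_cost 0).getD 0)
    else st1

def calc_minimum_cost_of_balloons (ballon_cost : List Int) (participants_data : List String) : Int :=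
  let r := participants_data.foldl (pvAStep ballon_cost) (0, 0)
  min r.1 r.2

-- ===== PORT B =====
def pvBStep (st : Int × Int) (data : String) : Int × Int :=
  let first : Int := if PySem.Str.pyGet? data 0 = some '1' then 1 else 0
  let second : Int := if PySem.Str.pyGet? data 1 = some '1' then 1 else 0
  (st.1 + (first + second), st.2 + (first - second))

def calc_minimum_cost_of_balloons_alt (ballon_cost : List Int) (participants_data : List String) : Int :=
  let c := participants_data.foldl pvBStep (0, 0)
  let b0 := (PySem.List.pyGet? ballon_cost 0).getD 0
  let b1 := (PySem.List.pyGet? ballon_cost 1).getD 0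
  PySem.Int.floordiv ((b0 + b1) * c.1 - |(b0 - b1) * c.2|) 2

-- ===== PRECONDITION & SPEC =====
-- Pre_ excludes rows shorter than 2 characters (both programs raise IndexError there) and
-- ballon_cost lists shorter than 2 (A still returns 0 when no participant solved anything,
-- but B's up-front price arithmetic raises IndexError there).
def Pre_calc_minimum_cost_of_balloons (ballon_cost : List Int) (participants_data : List String) : Prop :=
  2 ≤ ballon_cost.length ∧ ∀ s ∈ participants_data, 2 ≤ s.toList.length
instance (ballon_cost : List Int) (participants_data : List String) : Decidable (Pre_calc_minimum_cost_of_balloons ballon_cost participants_data) := by unfold Pre_calc_minimum_cost_of_balloons; infer_instance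
def pvWitness_calc_minimum_cost_of_balloons : List Int × List String := ([3, 7], ["10", "01", "11"])
def Spec_calc_minimum_cost_of_balloons (ballon_cost : List Int) (participants_data : List String) (out : Int) : Prop := out = calc_minimum_cost_of_balloons_alt ballon_cost participants_data
instance (ballon_cost : List Int) (participants_data : List String) (out : Int) : Decidable (Spec_calc_minimum_cost_of_balloons ballon_cost participants_data out) := by unfold Spec_calc_minimum_cost_of_balloons; infer_instance

-- ===== CLAIM =====
def Claim_equal_calc_minimum_cost_of_balloons : Prop := ∀ (ballon_cost : List Int) (participants_data : List String), Dom_calc_minimum_cost_of_balloons ballon_cost participants_data → Pre_calc_minimum_cost_of_balloons ballon_cost participants_data → Spec_calc_minimum_cost_of_balloons ballon_cost participants_data (calc_minimum_cost_of_balloons ballon_cost participants_data)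

-- ===== LEMMAS AND PROOFS =====
-- Invariant: sum and difference of A's two cost accumulators move in lockstep with
-- B's solves/imbalance state, scaled by b0+b1 resp. b0-b1.
theorem pvAB_eq (bc : List Int) (pd : List String) (g p s dd : Int) :
    ((pd.foldl (pvAStep bc) (g, p)).1 + (pd.foldl (pvAStep bc) (g, p)).2 =
      g + p + ((PySem.List.pyGet? bc 0).getD 0 + (PySem.List.pyGet? bc 1).getD 0)
        * ((pd.foldl pvBStep (s, dd)).1 - s)) ∧
    ((pd.foldl (pvAStep bc) (g, p)).1 - (pd.foldl (pvAStep bc) (g, p)).2 =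
      g - p + ((PySem.List.pyGet? bc 0).getD 0 - (PySem.List.pyGet? bc 1).getD 0)
        * ((pd.foldl pvBStep (s, dd)).2 - dd)) := by
  induction pd generalizing g p s dd with
  | nil => constructor <;> · simp only [List.foldl_nil]; ring
  | cons d t ih =>
    simp only [List.foldl_cons]
    dsimp only [pvAStep, pvBStep]
    split_ifs with h0 h1 h1 <;> (try dsimp only)
    · exact ⟨by rw [(ih (g + (PySem.List.pyGet? bc 0).getD 0 + (PySem.List.pyGet? bc 1).getD 0)
                       (p + (PySem.List.pyGet? bc 1).getD 0 + (PySem.List.pyGet? bc 0).getD 0)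
                       (s + (1 + 1)) (dd + (1 - 1))).1]; ring,
             by rw [(ih (g + (PySem.List.pyGet? bc 0).getD 0 + (PySem.List.pyGet? bc 1).getD 0)
                       (p + (PySem.List.pyGet? bc 1).getD 0 + (PySem.List.pyGet? bc 0).getD 0)
                       (s + (1 + 1)) (dd + (1 - 1))).2]; ring⟩
    · exact ⟨by rw [(ih (g + (PySem.List.pyGet? bc 1).getD 0)
                       (p + (PySem.List.pyGet? bc 0).getD 0)
                       (s + (0 + 1)) (dd + (0 - 1))).1]; ring,
             by rw [(ih (g + (PySem.List.pyGet? bc 1).getD 0)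
                       (p + (PySem.List.pyGet? bc 0).getD 0)
                       (s + (0 + 1)) (dd + (0 - 1))).2]; ring⟩
    · exact ⟨by rw [(ih (g + (PySem.List.pyGet? bc 0).getD 0)
                       (p + (PySem.List.pyGet? bc 1).getD 0)
                       (s + (1 + 0)) (dd + (1 - 0))).1]; ring,
             by rw [(ih (g + (PySem.List.pyGet? bc 0).getD 0)
                       (p + (PySem.List.pyGet? bc 1).getD 0)
                       (s + (1 + 0)) (dd + (1 - 0))).2]; ring⟩
    · exact ⟨by rw [(ih g p (s + (0 + 0)) (dd + (0 - 0))).1]; ring,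
             by rw [(ih g p (s + (0 + 0)) (dd + (0 - 0))).2]; ring⟩

theorem pvMin_eq (x y : Int) : min x y = PySem.Int.floordiv (x + y - |x - y|) 2 := by
  rw [PySem.Int.floordiv_eq_ediv_of_pos (by omega)]
  rcases le_total x y with h | h
  · rw [min_eq_left h, abs_of_nonpos (by omega)]; omega
  · rw [min_eq_right h, abs_of_nonneg (by omega)]; omega

-- ===== VERDICT =====
theorem calc_minimum_cost_of_balloons_spec : Claim_equal_calc_minimum_cost_of_balloons := by
  intro bc pd _ _
  unfold Spec_calc_minimum_cost_of_balloons calc_minimum_cost_of_balloons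
    calc_minimum_cost_of_balloons_alt
  dsimp only
  rw [pvMin_eq, (pvAB_eq bc pd 0 0 0 0).1, (pvAB_eq bc pd 0 0 0 0).2]
  congr 1 <;> ring_nf
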